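-- pv_equiv track=rewrite | github.com/jgrar/aoc | 2018/05/b/main.py | process
-- ===== SOURCE A (Python) =====
-- def reacts (a, b):
-- 	return a != b and a.casefold() == b.casefold()
--
-- def process (units, ignore):
--
-- 	result = []
-- 	for u in units:
-- 		if u.casefold() == ignore.casefold():
-- 			continue
--
-- 		if result and reacts(result[-1], u):
-- 			result.pop()
-- 		else:
-- 			result.append(u)
--
-- 	return result
-- ===== SOURCE B (Python) =====
-- def reacts(a, b):
--     return a != b and a.casefold() == b.casefold()
--
-- def process(units, ignore):
--     ig = ignore.casefold()
--     pol = [u for u in units if u.casefold() != ig]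
--     while True:
--         for i in range(len(pol) - 1):
--             if reacts(pol[i], pol[i + 1]):
--                 del pol[i : i + 2]
--                 break
--         else:
--             return pol
-- ===== Notes on version B (the rewrite author's own statement) =====
-- stated objective: alternative
-- what changed: Replaces the single left-to-right stack pass (with ignore.casefold() recomputed per element) by a one-time pre-filter of ignored units against a hoisted ignore.casefold(), followed by repeated deletion of the leftmost adjacent reacting pair until a fixpoint.
import Mathlib
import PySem

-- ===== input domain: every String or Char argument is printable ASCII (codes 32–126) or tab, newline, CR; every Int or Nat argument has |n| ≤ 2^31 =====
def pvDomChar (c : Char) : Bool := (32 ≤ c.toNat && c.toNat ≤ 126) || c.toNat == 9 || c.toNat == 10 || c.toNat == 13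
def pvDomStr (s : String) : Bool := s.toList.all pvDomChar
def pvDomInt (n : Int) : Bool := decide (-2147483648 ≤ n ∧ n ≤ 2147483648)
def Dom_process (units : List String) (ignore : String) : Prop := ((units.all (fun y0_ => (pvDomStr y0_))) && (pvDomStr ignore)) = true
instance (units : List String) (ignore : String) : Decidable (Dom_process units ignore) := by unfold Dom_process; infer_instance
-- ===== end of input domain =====

-- B replaces A's single left-to-right stack pass by a pre-filter of ignored units plus
-- repeated removal of the leftmost adjacent reacting pair until a fixpoint (alternative, not faster).
-- casefold is ported as PySem.Str.lower, exact on the ASCII domain Dom_process.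

-- ===== PORT A =====
-- helper 'reacts' of the Python module (shared verbatim by both Python versions)
def pvReacts (a b : String) : Bool := (a != b) && (PySem.Str.lower a == PySem.Str.lower b)

-- the body of A's for-loop: skip ignored unit, else pop on reaction with result[-1] or append
def pvStepA (ignore : String) (result : List String) (u : String) : List String :=
  if PySem.Str.lower u == PySem.Str.lower ignore then result
  else
    match result.getLast? with
    | some t => if pvReacts t u then result.dropLast else result ++ [u]
    | none => result ++ [u]

def process (units : List String) (ignore : String) : List String :=
  units.foldl (pvStepA ignore) []

-- ===== PORT B =====
-- inner for-scan of Source B: delete the leftmost adjacent reacting pair, none = no pair found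
def pvRemoveFirst : List String → Option (List String)
  | x :: y :: r => if pvReacts x y then some r else (pvRemoveFirst (y :: r)).map (x :: ·)
  | _ => none

-- needed by pvReduceFix's termination
lemma pvRemoveFirst_length : ∀ l l', pvRemoveFirst l = some l' → l'.length + 2 = l.length := by
  intro l
  induction l with
  | nil => intro l' h; simp [pvRemoveFirst] at h
  | cons x t ih =>
    intro l' h
    cases t with
    | nil => simp [pvRemoveFirst] at h
    | cons y r =>
      by_cases hr : pvReacts x y = true
      · simp [pvRemoveFirst, hr] at h
        subst h
        simp
      · simp [pvRemoveFirst, hr] at h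
        obtain ⟨m, hm, hl⟩ := h
        have := ih m hm
        subst hl
        simp only [List.length_cons] at this ⊢
        omega

-- outer while-loop of Source B: rescan from scratch until no pair is removable
def pvReduceFix (l : List String) : List String :=
  match h : pvRemoveFirst l with
  | some l' => pvReduceFix l'
  | none => l
termination_by l.length
decreasing_by have := pvRemoveFirst_length l l' h; omega

def process_alt (units : List String) (ignore : String) : List String :=
  pvReduceFix (units.filter (fun u => PySem.Str.lower u != PySem.Str.lower ignore))

-- ===== PRECONDITION & SPEC =====
def Spec_process (units : List String) (ignore : String) (out : List String) : Prop := out = process_alt units ignore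
instance (units : List String) (ignore : String) (out : List String) : Decidable (Spec_process units ignore out) := by unfold Spec_process; infer_instance

-- ===== CLAIM (what is proved, stated in full; the proofs are below) =====
def Claim_equal_process : Prop := ∀ (units : List String) (ignore : String), Dom_process units ignore → Spec_process units ignore (process units ignore)

-- ===== LEMMAS AND PROOFS =====

-- common ground of both proofs: the stack step with the stack's top at the HEAD
def pvPush (s : List String) (u : String) : List String :=
  match s with
  | t :: s' => if pvReacts t u then s' else u :: t :: s'
  | [] => [u]

-- A's fold over the append-at-end result list is the reversed head-stack fold over the filtered input
lemma pv_fold_push (ignore : String) : ∀ (l s : List String),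
    List.foldl (pvStepA ignore) s.reverse l
      = (List.foldl pvPush s (l.filter (fun u => PySem.Str.lower u != PySem.Str.lower ignore))).reverse := by
  intro l
  induction l with
  | nil => intro s; simp
  | cons u l ih =>
    intro s
    by_cases h : (PySem.Str.lower u == PySem.Str.lower ignore) = true
    · have h1 : pvStepA ignore s.reverse u = s.reverse := by simp [pvStepA, h]
      have h2 : (PySem.Str.lower u != PySem.Str.lower ignore) = false := by simp [bne, h]
      simp only [List.foldl_cons, h1, List.filter_cons, h2]
      exact ih s
    · have h2 : (PySem.Str.lower u != PySem.Str.lower ignore) = true := by simp [bne, h]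
      have hstep : pvStepA ignore s.reverse u = (pvPush s u).reverse := by
        cases s with
        | nil => simp [pvStepA, h, pvPush]
        | cons t s' =>
          by_cases hr : pvReacts t u = true
          · simp [pvStepA, h, pvPush, hr]
          · simp [pvStepA, h, pvPush, hr]
      simp only [List.foldl_cons, hstep, List.filter_cons, h2, if_pos]
      exact ih (pvPush s u)

lemma pv_processA_eq (units : List String) (ignore : String) :
    process units ignore
      = (List.foldl pvPush [] (units.filter (fun u => PySem.Str.lower u != PySem.Str.lower ignore))).reverse := by
  have h := pv_fold_push ignore units []
  simpa [process] using h

-- on a chain with no reacting adjacent pair the stack never pops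
lemma pv_nopop : ∀ (l : List String) (t : String) (s : List String),
    List.IsChain (fun a b => pvReacts a b = false) (t :: l) →
    List.foldl pvPush (t :: s) l = l.reverse ++ t :: s := by
  intro l
  induction l with
  | nil => intro t s _; simp
  | cons u l ih =>
    intro t s hc
    obtain ⟨h, hc'⟩ := List.isChain_cons_cons.mp hc
    · have hp : pvPush (t :: s) u = u :: t :: s := by simp [pvPush, h]
      rw [List.foldl_cons, hp, ih u (t :: s) hc']
      simp

lemma pv_removeFirst_none_chain : ∀ l, pvRemoveFirst l = none →
    List.IsChain (fun a b => pvReacts a b = false) l := by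
  intro l
  induction l with
  | nil => intro _; exact List.IsChain.nil
  | cons x t ih =>
    cases t with
    | nil => intro _; exact List.IsChain.singleton x
    | cons y r =>
      intro h
      by_cases hr : pvReacts x y = true
      · simp [pvRemoveFirst, hr] at h
      · simp [pvRemoveFirst, hr] at h
        exact List.isChain_cons_cons.mpr ⟨by simpa using hr, ih h⟩

lemma pv_nopop_nil (l : List String) (h : pvRemoveFirst l = none) :
    List.foldl pvPush [] l = l.reverse := by
  cases l with
  | nil => rfl
  | cons u l' =>
    have hc : List.IsChain (fun a b => pvReacts a b = false) (u :: l') := pv_removeFirst_none_chain _ h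
    have hp : pvPush [] u = [u] := rfl
    rw [List.foldl_cons, hp, pv_nopop l' u [] hc]
    simp

-- removing the leftmost reacting pair does not change the stack fold, provided the element
-- below the scan point does not react with the scan's first element
lemma pv_step_some_gen : ∀ (r : List String) (x y : String) (l' : List String) (t : String) (s : List String),
    pvRemoveFirst (x :: y :: r) = some l' → pvReacts t x = false →
    List.foldl pvPush (t :: s) (x :: y :: r) = List.foldl pvPush (t :: s) l' := by
  intro r
  induction r with
  | nil =>
    intro x y l' t s h htx
    by_cases hr : pvReacts x y = true
    · simp [pvRemoveFirst, hr] at h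
      subst h
      simp [pvPush, htx, hr]
    · simp [pvRemoveFirst, hr] at h
  | cons z r' ih =>
    intro x y l' t s h htx
    by_cases hr : pvReacts x y = true
    · simp [pvRemoveFirst, hr] at h
      subst h
      simp [pvPush, htx, hr]
    · simp [pvRemoveFirst, hr] at h
      obtain ⟨m, hm, hl⟩ := h
      subst hl
      have h1 : pvPush (t :: s) x = x :: t :: s := by simp [pvPush, htx]
      rw [List.foldl_cons, h1, ih y z m x (t :: s) hm (by simpa using hr),
        List.foldl_cons, h1]

lemma pv_step_some (l l' : List String) (h : pvRemoveFirst l = some l') :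
    List.foldl pvPush [] l = List.foldl pvPush [] l' := by
  match l with
  | [] => simp [pvRemoveFirst] at h
  | [x] => simp [pvRemoveFirst] at h
  | x :: y :: r =>
    by_cases hr : pvReacts x y = true
    · simp [pvRemoveFirst, hr] at h
      subst h
      simp [pvPush, hr]
    · simp [pvRemoveFirst, hr] at h
      obtain ⟨m, hm, hl⟩ := h
      subst hl
      match r with
      | [] => simp [pvRemoveFirst] at hm
      | z :: r' =>
        have h1 : pvPush [] x = [x] := rfl
        rw [List.foldl_cons, h1, pv_step_some_gen r' y z m x [] hm (by simpa using hr),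
          List.foldl_cons, h1]

-- B's fixpoint of leftmost-pair removal equals the (reversed) stack fold
lemma pv_reduceFix_eq : ∀ l, pvReduceFix l = (List.foldl pvPush [] l).reverse := by
  intro l
  induction l using pvReduceFix.induct with
  | case1 l l' h ih =>
    rw [pvReduceFix]
    split
    · rename_i m hm
      rw [h] at hm
      have hml : m = l' := (Option.some.inj hm).symm
      subst hml
      rw [ih, pv_step_some l m h]
    · rename_i hm
      rw [h] at hm
      cases hm
  | case2 l h =>
    rw [pvReduceFix]
    split
    · rename_i m hm
      rw [h] at hm
      cases hm
    · rw [pv_nopop_nil l h]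
      simp

-- ===== VERDICT (by name: the statement is the Claim_ definition above) =====
theorem process_spec : Claim_equal_process := by
  intro units ignore _
  unfold Spec_process process_alt
  rw [pv_reduceFix_eq, pv_processA_eq]
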